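-- pv_equiv track=rewrite | github.com/nohjuhyeon/coding_test | Python3/프로그래머스/1/133502. 햄버거 만들기/햄버거 만들기.py | solution
-- ===== SOURCE A (Python) =====
-- def solution(ingredient):
--     answer_list = []
--     answer = 0
--     for i in ingredient:
--         if len(answer_list) != 0:
--             if answer_list[-1] == 1:
--                 if i == 1:
--                     answer_list.append(i)
--                 elif i == 2:
--                     answer_list[-1] += 2
--                 else:
--                     answer_list= []
--             elif answer_list[-1] == 3:
--                 if i == 1:
--                     answer_list.append(i)
--                 elif i == 3:
--                     answer_list[-1] += 3
--                 else:
--                     answer_list= []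
--             elif answer_list[-1] == 6:
--                 if i == 1:
--                     answer += 1
--                     answer_list= answer_list[:-1]
--                 else:
--                     answer_list = []
--         else:
--             if i == 1:
--                 answer_list.append(i)
--     return answer
-- ===== SOURCE B (Python) =====
-- def solution(ingredient):
--     stack = []
--     answer = 0
--     for i in ingredient:
--         stack.append(i)
--         if stack[-4:] == [1, 2, 3, 1]:
--             del stack[-4:]
--             answer += 1
--     return answer
-- ===== Notes on version B (the rewrite author's own statement) =====
-- stated objective: simpler
-- what changed: Replaces A's compressed-integer state machine (stack of accumulated values 1/3/6 with branch-per-value logic and full-list resets) by a plain stack of the raw ingredients from which the window [1,2,3,1] is deleted whenever it appears on top.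
import Mathlib
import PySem

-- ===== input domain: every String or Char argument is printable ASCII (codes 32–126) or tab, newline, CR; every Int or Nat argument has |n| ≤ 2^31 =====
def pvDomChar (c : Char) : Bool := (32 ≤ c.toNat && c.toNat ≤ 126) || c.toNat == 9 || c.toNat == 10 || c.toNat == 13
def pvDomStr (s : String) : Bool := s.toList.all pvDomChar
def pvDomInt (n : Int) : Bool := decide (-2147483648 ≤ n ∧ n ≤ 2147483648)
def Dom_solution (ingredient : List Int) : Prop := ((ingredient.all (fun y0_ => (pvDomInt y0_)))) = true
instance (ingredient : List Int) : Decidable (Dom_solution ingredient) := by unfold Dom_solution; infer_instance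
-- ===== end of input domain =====

-- B replaces A's compressed 1/3/6 state machine (with full-list resets) by a stack of the
-- raw ingredients from which the window [1,2,3,1] is deleted whenever it appears on top;
-- objective: simpler. Both ports keep their Python list reversed (head = Python's last element),
-- so append = cons, [-1] = head, [:-1] = tail, and the last-four window is the first four.

-- ===== PORT A =====
-- state = (answer_list reversed, answer); one fold step per ingredient, branches in A's order
def stepA (st : List Int × Int) (i : Int) : List Int × Int :=
  match st with
  | (l, ans) =>
    match l with
    | [] =>                                  -- len(answer_list) == 0
      if i = 1 then (i :: l, ans) else (l, ans)
    | x :: rest =>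
      if x = 1 then                          -- answer_list[-1] == 1
        if i = 1 then (i :: l, ans)
        else if i = 2 then ((x + 2) :: rest, ans)
        else ([], ans)
      else if x = 3 then                     -- answer_list[-1] == 3
        if i = 1 then (i :: l, ans)
        else if i = 3 then ((x + 3) :: rest, ans)
        else ([], ans)
      else if x = 6 then                     -- answer_list[-1] == 6
        if i = 1 then (rest, ans + 1)
        else ([], ans)
      else (l, ans)                          -- no branch fires: Python does nothing

def solution (ingredient : List Int) : Int :=
  (ingredient.foldl stepA ([], 0)).2

-- ===== PORT B =====
-- state = (stack reversed, answer); stack[-4:] == [1,2,3,1] is take 4 = [1,3,2,1] on the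
-- reversed stack, and del stack[-4:] is drop 4
def stepB (st : List Int × Int) (i : Int) : List Int × Int :=
  match st with
  | (s, ans) =>
    let s' := i :: s
    if s'.take 4 = [1, 3, 2, 1] then (s'.drop 4, ans + 1) else (s', ans)

def solution_alt (ingredient : List Int) : Int :=
  (ingredient.foldl stepB ([], 0)).2

-- ===== PRECONDITION & SPEC =====
def Spec_solution (ingredient : List Int) (out : Int) : Prop := out = solution_alt ingredient
instance (ingredient : List Int) (out : Int) : Decidable (Spec_solution ingredient out) := by unfold Spec_solution; infer_instance

-- ===== CLAIM (what is proved, stated in full; the proofs are below) =====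
def Claim_equal_solution : Prop := ∀ (ingredient : List Int), Dom_solution ingredient → Spec_solution ingredient (solution ingredient)

-- ===== LEMMAS AND PROOFS =====

-- decode A's compressed (reversed) list back to the raw (reversed) ingredients it stands for
def rdec (c : List Int) : List Int :=
  c.flatMap (fun x => if x = 1 then [1] else if x = 3 then [2, 1] else [3, 2, 1])

-- the junk below the live part of B's stack can never start a [1,3,2,1] window
def QJ (j : List Int) : Prop :=
  j.take 1 ≠ [1] ∧ j.take 2 ≠ [2, 1] ∧ j.take 3 ≠ [3, 2, 1]

-- A's list holds only 1/3 values, except possibly a 6 on top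
def WfA : List Int → Prop
  | [] => True
  | x :: rest => (x = 1 ∨ x = 3 ∨ x = 6) ∧ ∀ y ∈ rest, y = 1 ∨ y = 3

lemma step_sim (c j : List Int) (a i : Int) (hq : QJ j) (hw : WfA c) :
    ∃ c' j', stepA (c, a) i = (c', (stepB (rdec c ++ j, a) i).2) ∧
      (stepB (rdec c ++ j, a) i).1 = rdec c' ++ j' ∧ QJ j' ∧ WfA c' := by
  obtain ⟨hq1, hq2, hq3⟩ := hq
  match c with
  | [] =>
    by_cases hi : i = 1
    · subst hi
      refine ⟨[1], j, ?_, ?_, ⟨hq1, hq2, hq3⟩, by simp [WfA]⟩ <;>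
        simp_all [stepA, stepB, rdec, QJ, List.take_succ_cons]
    · refine ⟨[], i :: j, ?_, ?_, ?_, trivial⟩
      · simp [stepA, stepB, rdec, hi, List.take_succ_cons]
      · simp [stepB, rdec, hi, List.take_succ_cons]
      · cases j with
        | nil => refine ⟨by simpa using hi, by simp, by simp⟩
        | cons h t =>
          refine ⟨by simpa using hi, ?_, ?_⟩
          · intro hcontra
            simp [List.take_succ_cons] at hcontra
            exact hq1 (by simp [hcontra.2])
          · intro hcontra
            cases t with
            | nil => simp [List.take_succ_cons] at hcontra
            | cons h2 t2 =>
              simp [List.take_succ_cons] at hcontra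
              exact hq2 (by simp [List.take_succ_cons, hcontra.2.1, hcontra.2.2])
  | x :: rest =>
    obtain ⟨hx, hrest⟩ := hw
    rcases hx with hx | hx | hx <;> subst hx
    · -- top of A's list is 1, decoded [1]
      by_cases hi : i = 1
      · subst hi
        exact ⟨1 :: 1 :: rest, j, by simp [stepA, stepB, rdec, List.take_succ_cons],
          by simp [stepB, rdec, List.take_succ_cons], ⟨hq1, hq2, hq3⟩,
          ⟨Or.inl rfl, by
            intro y hy
            rcases List.mem_cons.1 hy with hy | hy
            · exact Or.inl hy
            · exact hrest y hy⟩⟩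
      · by_cases hi2 : i = 2
        · subst hi2
          exact ⟨3 :: rest, j, by norm_num [stepA, stepB, rdec, List.take_succ_cons],
            by norm_num [stepB, rdec, List.take_succ_cons], ⟨hq1, hq2, hq3⟩,
            ⟨Or.inr (Or.inl rfl), hrest⟩⟩
        · -- reset; new junk = i :: 1 :: rdec rest ++ j
          refine ⟨[], i :: 1 :: rdec rest ++ j, ?_, ?_, ?_, trivial⟩
          · simp [stepA, stepB, rdec, hi, hi2, List.take_succ_cons]
          · simp [stepB, rdec, hi, hi2, List.take_succ_cons]
          · refine ⟨by simpa [List.take_succ_cons] using hi, ?_, ?_⟩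
            · intro hcontra; simp [List.take_succ_cons] at hcontra; first | exact hi2 hcontra | exact hi2 hcontra.1
            · intro hcontra; simp [List.take_succ_cons] at hcontra
    · -- top of A's list is 3, decoded [2,1]
      by_cases hi : i = 1
      · subst hi
        exact ⟨1 :: 3 :: rest, j, by norm_num [stepA, stepB, rdec, List.take_succ_cons],
          by norm_num [stepB, rdec, List.take_succ_cons], ⟨hq1, hq2, hq3⟩,
          ⟨Or.inl rfl, by
            intro y hy
            rcases List.mem_cons.1 hy with hy | hy
            · exact Or.inr hy
            · exact hrest y hy⟩⟩
      · by_cases hi3 : i = 3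
        · subst hi3
          exact ⟨6 :: rest, j, by norm_num [stepA, stepB, rdec, List.take_succ_cons],
            by norm_num [stepB, rdec, List.take_succ_cons], ⟨hq1, hq2, hq3⟩,
            ⟨Or.inr (Or.inr rfl), hrest⟩⟩
        · refine ⟨[], i :: 2 :: 1 :: rdec rest ++ j, ?_, ?_, ?_, trivial⟩
          · simp [stepA, stepB, rdec, hi, hi3, List.take_succ_cons]
          · simp [stepB, rdec, hi, hi3, List.take_succ_cons]
          · exact ⟨by simpa [List.take_succ_cons] using hi, by simp [List.take_succ_cons],
              by intro hcontra; simp [List.take_succ_cons] at hcontra; first | exact hi3 hcontra | exact hi3 hcontra.1⟩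
    · -- top of A's list is 6, decoded [3,2,1]
      by_cases hi : i = 1
      · subst hi
        refine ⟨rest, j, by norm_num [stepA, stepB, rdec, List.take_succ_cons],
          by norm_num [stepB, rdec, List.take_succ_cons], ⟨hq1, hq2, hq3⟩, ?_⟩
        cases rest with
        | nil => trivial
        | cons y t =>
          refine ⟨?_, fun z hz => hrest z (List.mem_cons_of_mem _ hz)⟩
          rcases hrest y List.mem_cons_self with h | h
          · exact Or.inl h
          · exact Or.inr (Or.inl h)
      · refine ⟨[], i :: 3 :: 2 :: 1 :: rdec rest ++ j, ?_, ?_, ?_, trivial⟩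
        · simp [stepA, stepB, rdec, hi, List.take_succ_cons]
        · simp [stepB, rdec, hi, List.take_succ_cons]
        · exact ⟨by simpa [List.take_succ_cons] using hi, by simp [List.take_succ_cons],
            by simp [List.take_succ_cons]⟩

lemma fold_sim (l : List Int) : ∀ (c j : List Int) (a : Int), QJ j → WfA c →
    (l.foldl stepA (c, a)).2 = (l.foldl stepB (rdec c ++ j, a)).2 := by
  induction l with
  | nil => intro c j a _ _; simp
  | cons i t ih =>
    intro c j a hq hw
    obtain ⟨c', j', hA, hB1, hq', hw'⟩ := step_sim c j a i hq hw
    have hB : stepB (rdec c ++ j, a) i = (rdec c' ++ j', (stepB (rdec c ++ j, a) i).2) := by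
      rw [← hB1]
    rw [List.foldl_cons, List.foldl_cons, hA, hB]
    exact ih c' j' _ hq' hw'

-- ===== VERDICT (by name: the statement is the Claim_ definition above) =====
theorem solution_spec : Claim_equal_solution := by
  intro ingredient _
  unfold Spec_solution solution solution_alt
  have := fold_sim ingredient [] [] 0 ⟨by simp, by simp, by simp⟩ trivial
  simpa [rdec] using this
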